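-- pv_equiv track=rewrite | github.com/jojowither/Joint_Entity_and_Relation_Extraction | data_util.py | calculate_maxlen
-- ===== SOURCE A (Python) =====
-- def calculate_maxlen(cv_contents):
--     count_sentence = {i:0 for i in range(489)}
--     start_idx = 0
--     end_idx = 0
--     maxlen = 0
--
--     for i, word in enumerate(cv_contents):
--         if word=='':
--             end_idx = i
--             if maxlen<(end_idx-start_idx):
--                 maxlen = end_idx-start_idx
--             count_sentence[end_idx-start_idx]+=1
--             start_idx = i+1
--
--
--     return count_sentence
-- ===== SOURCE B (Python) =====
-- def calculate_maxlen(cv_contents):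
--     # Different algorithm: repeatedly cut the list at the next '' delimiter
--     # (index + slice) to collect completed-sentence lengths, then build the
--     # 0..488 histogram directly by counting each length (no dict mutation).
--     lengths = []
--     rest = cv_contents
--     while '' in rest:
--         k = rest.index('')
--         lengths.append(k)
--         rest = rest[k + 1:]
--     return {i: lengths.count(i) for i in range(489)}
-- ===== Notes on version B (the rewrite author's own statement) =====
-- stated objective: alternative
-- what changed: Instead of A's single enumerate loop that threads start/end/maxlen state and mutates a pre-seeded dict, B repeatedly cuts the list at the next '' delimiter (index + slice) to collect sentence lengths and then builds the whole 0..488 histogram in one counting dict comprehension with no mutation.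
import Mathlib
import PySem

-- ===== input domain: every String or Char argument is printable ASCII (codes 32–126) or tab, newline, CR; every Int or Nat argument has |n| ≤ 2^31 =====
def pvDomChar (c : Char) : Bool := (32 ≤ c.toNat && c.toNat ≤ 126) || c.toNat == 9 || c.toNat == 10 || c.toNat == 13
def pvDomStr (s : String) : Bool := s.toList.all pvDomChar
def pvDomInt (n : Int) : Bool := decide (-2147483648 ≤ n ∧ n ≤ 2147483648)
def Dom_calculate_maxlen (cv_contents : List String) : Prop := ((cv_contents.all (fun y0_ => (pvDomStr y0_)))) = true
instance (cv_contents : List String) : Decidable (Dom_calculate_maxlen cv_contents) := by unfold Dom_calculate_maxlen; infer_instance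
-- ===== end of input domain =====

-- B replaces A's stateful enumerate-and-tally loop by cut-at-next-delimiter slicing plus a counting
-- dict comprehension (alternative algorithm, no dict mutation); equivalence proved on Pre_ (no KeyError).

-- ===== PORT A =====
def calculate_maxlen (cv_contents : List String) : List (Int × Int) :=
  let count_sentence : PySem.Dict Int Int :=
    (PySem.List.pyRange 0 489 1).foldl (fun d i => d.insert i 0) PySem.Dict.empty
  let st := (PySem.List.enumerate cv_contents 0).foldl
    (fun (st : PySem.Dict Int Int × Int × Int × Int) iw =>
      match st with
      | (d, start_idx, end_idx0, maxlen0) =>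
        if iw.2 == "" then
          let end_idx := iw.1
          let maxlen := if maxlen0 < end_idx - start_idx then end_idx - start_idx else maxlen0
          -- count_sentence[end_idx-start_idx] += 1 (key present for all inputs in Pre_; Python raises outside it)
          let d := d.modify (end_idx - start_idx) 0 (· + 1)
          (d, end_idx + 1, end_idx, maxlen)
        else (d, start_idx, end_idx0, maxlen0))
    (count_sentence, 0, 0, 0)
  st.1.items

-- ===== PORT B =====
-- the while loop of Source B: cut at the next '' (membership test, index, slice), collecting the cut position
def pvCutLens (rest : List String) : List Int :=
  if _h : "" ∈ rest then
    match hk : PySem.List.index? rest "" with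
    | some k => (k : Int) :: pvCutLens (PySem.List.slice rest (some ((k : Int) + 1)) none)
    | none => []   -- unreachable: '' ∈ rest
  else []
termination_by rest.length
decreasing_by
  have hx := PySem.List.getElem_of_index?_eq_some hk
  obtain ⟨hklt, -, -⟩ := hx
  have : ((k : Int) + 1) = ((k + 1 : Nat) : Int) := by push_cast; ring
  rw [this, PySem.List.slice_from_natCast]
  simp [List.length_drop]
  omega

def calculate_maxlen_alt (cv_contents : List String) : List (Int × Int) :=
  let lengths := pvCutLens cv_contents
  ((PySem.List.pyRange 0 489 1).foldl
      (fun (d : PySem.Dict Int Int) i => d.insert i ((PySem.List.count lengths i : Nat) : Int))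
      PySem.Dict.empty).items

-- ===== PRECONDITION & SPEC =====
-- Pre_ excludes exactly the inputs where the Python A raises KeyError: some ''-terminated segment
-- (a chunk of the split on '' other than the trailing one) has length ≥ 489.
def Pre_calculate_maxlen (cv_contents : List String) : Prop :=
  ∀ l ∈ (cv_contents.splitOnP (fun w => w == "")).dropLast, l.length < 489
instance (cv_contents : List String) : Decidable (Pre_calculate_maxlen cv_contents) := by unfold Pre_calculate_maxlen; infer_instance
def pvWitness_calculate_maxlen : List String := ["ab", "cd", "", "x", ""]

def Spec_calculate_maxlen (cv_contents : List String) (out : List (Int × Int)) : Prop := out = calculate_maxlen_alt cv_contents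
instance (cv_contents : List String) (out : List (Int × Int)) : Decidable (Spec_calculate_maxlen cv_contents out) := by unfold Spec_calculate_maxlen; infer_instance

-- ===== CLAIM (what is proved, stated in full; the proofs are below) =====
def Claim_equal_calculate_maxlen : Prop := ∀ (cv_contents : List String), Dom_calculate_maxlen cv_contents → Pre_calculate_maxlen cv_contents → Spec_calculate_maxlen cv_contents (calculate_maxlen cv_contents)

-- ===== LEMMAS AND PROOFS =====

/-- Specification of the multiset of counted lengths: the lengths of the chunks of the split
    of the input on `''`, the trailing chunk excluded. -/
def pvSegLens (ws : List String) : List Int :=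
  ((ws.splitOnP (fun w => w == "")).dropLast).map (fun l => (l.length : Int))

/-- The segment lengths A counts, as harvested from its loop state (index `i`, segment start `start`). -/
def pvLens : List String → Int → Int → List Int
  | [], _, _ => []
  | w :: ws, i, start =>
    if w == "" then (i - start) :: pvLens ws (i + 1) (i + 1) else pvLens ws (i + 1) start

/-- `pvLens` with the state compressed to the offset `o = i - start`. -/
def pvLens0 : List String → Int → List Int
  | [], _ => []
  | w :: ws, o => if w == "" then o :: pvLens0 ws 0 else pvLens0 ws (o + 1)

theorem pvA_fold (ws : List String) : ∀ (i start e m : Int) (d : PySem.Dict Int Int),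
    ((PySem.List.enumerate ws i).foldl
      (fun (st : PySem.Dict Int Int × Int × Int × Int) iw =>
        match st with
        | (d, start_idx, end_idx0, maxlen0) =>
          if iw.2 == "" then
            let end_idx := iw.1
            let maxlen := if maxlen0 < end_idx - start_idx then end_idx - start_idx else maxlen0
            let d := d.modify (end_idx - start_idx) 0 (· + 1)
            (d, end_idx + 1, end_idx, maxlen)
          else (d, start_idx, end_idx0, maxlen0))
      (d, start, e, m)).1
    = (pvLens ws i start).foldl (fun d L => d.modify L 0 (· + 1)) d := by
  induction ws with
  | nil => intro i start e m d; simp [PySem.List.enumerate_nil, pvLens]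
  | cons w ws ih =>
    intro i start e m d
    rw [PySem.List.enumerate_cons]
    by_cases h : w = ""
    · subst h
      exact ih (i+1) (i+1) i (if m < i - start then i - start else m) (d.modify (i - start) 0 (· + 1))
    · have ih' := ih (i+1) start e m d
      simp only [List.foldl_cons]
      simp [pvLens, h] at ih' ⊢
      exact ih'

theorem pvLens_eq_off (ws : List String) : ∀ (i start : Int),
    pvLens ws i start = pvLens0 ws (i - start) := by
  induction ws with
  | nil => intro i start; simp [pvLens, pvLens0]
  | cons w ws ih =>
    intro i start
    by_cases h : w = ""
    · have h1 := ih (i+1) (i+1)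
      simp only [pvLens, pvLens0, h, if_pos, beq_self_eq_true] at h1 ⊢
      simpa using h1
    · have h1 := ih (i+1) start
      have h2 : i + 1 - start = i - start + 1 := by ring
      simp [pvLens, pvLens0, h, h1, h2]

theorem pvSplit_sep (pre suf : List String) (h : "" ∉ pre) :
    (pre ++ "" :: suf).splitOnP (fun w => w == "") = pre :: suf.splitOnP (fun w => w == "") := by
  induction pre with
  | nil => simp [List.splitOnP_cons]
  | cons x pre ih =>
    have hx : x ≠ "" := by intro hx; exact h (by simp [hx])
    have := ih (by intro hm; exact h (by simp [hm]))
    simp [List.splitOnP_cons, hx, this]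

theorem pvSegLens_sep (pre suf : List String) (h : "" ∉ pre) :
    pvSegLens (pre ++ "" :: suf) = (pre.length : Int) :: pvSegLens suf := by
  unfold pvSegLens
  rw [pvSplit_sep pre suf h]
  rw [List.dropLast_cons_of_ne_nil (List.splitOnP_ne_nil _ _)]
  simp

theorem pvSegLens_no (ws : List String) (h : "" ∉ ws) : pvSegLens ws = [] := by
  unfold pvSegLens
  have hx : ∀ x ∈ ws, ¬ (x == "") = true := by
    intro x hx
    simp only [Bool.not_eq_true, beq_eq_false_iff_ne]
    exact fun he => h (he ▸ hx)
  rw [List.splitOnP_eq_single _ _ hx]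
  simp

theorem pvLens0_sep (pre suf : List String) (h : "" ∉ pre) : ∀ (o : Int),
    pvLens0 (pre ++ "" :: suf) o = (o + pre.length) :: pvLens0 suf 0 := by
  induction pre with
  | nil => intro o; simp [pvLens0]
  | cons x pre ih =>
    intro o
    have hx : x ≠ "" := by intro hx; exact h (by simp [hx])
    have := ih (by intro hm; exact h (by simp [hm])) (o + 1)
    simp [pvLens0, hx, this]; ring

theorem pvLens0_no (ws : List String) (h : "" ∉ ws) : ∀ o, pvLens0 ws o = [] := by
  induction ws with
  | nil => intro o; simp [pvLens0]
  | cons x ws ih =>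
    intro o
    have hx : x ≠ "" := by intro hx; exact h (by simp [hx])
    simp [pvLens0, hx, ih (by intro hm; exact h (by simp [hm]))]

/-- Decompose a list containing `''` at its FIRST occurrence. -/
theorem pvFirstSep (ws : List String) (h : "" ∈ ws) :
    ∃ pre suf, ws = pre ++ "" :: suf ∧ "" ∉ pre := by
  induction ws with
  | nil => simp at h
  | cons x ws ih =>
    by_cases hx : x = ""
    · exact ⟨[], ws, by simp [hx], by simp⟩
    · have hm : "" ∈ ws := by
        cases List.mem_cons.1 h with
        | inl h1 => exact absurd h1.symm hx
        | inr h1 => exact h1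
      obtain ⟨pre, suf, hws, hp⟩ := ih hm
      refine ⟨x :: pre, suf, by simp [hws], ?_⟩
      simp only [List.mem_cons, not_or]
      exact ⟨fun he => hx he.symm, hp⟩

theorem pvLens0_eq_seg (ws : List String) : pvLens0 ws 0 = pvSegLens ws := by
  induction hn : ws.length using Nat.strong_induction_on generalizing ws with
  | _ n ih =>
    by_cases h : "" ∈ ws
    · obtain ⟨pre, suf, hws, hp⟩ := pvFirstSep ws h
      subst hws
      rw [pvLens0_sep pre suf hp 0, pvSegLens_sep pre suf hp,
          ih suf.length (by subst hn; simp; omega) suf rfl]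
      simp
    · rw [pvLens0_no ws h 0, pvSegLens_no ws h]

theorem pvCutLens_eq_seg (ws : List String) : pvCutLens ws = pvSegLens ws := by
  induction hn : ws.length using Nat.strong_induction_on generalizing ws with
  | _ n ih =>
    by_cases h : "" ∈ ws
    · obtain ⟨pre, suf, hws, hp⟩ := pvFirstSep ws h
      subst hws
      have hidx : PySem.List.index? (pre ++ "" :: suf) "" = some pre.length := by
        rw [PySem.List.index?_eq_some_iff]
        exact ⟨pre, suf, rfl, rfl, hp⟩
      have hslice : PySem.List.slice (pre ++ "" :: suf) (some ((pre.length : Int) + 1)) none = suf := by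
        have : ((pre.length : Int) + 1) = ((pre.length + 1 : Nat) : Int) := by push_cast; ring
        rw [this, PySem.List.slice_from_natCast]
        have : pre ++ "" :: suf = (pre ++ [""]) ++ suf := by simp
        rw [this]
        rw [show pre.length + 1 = (pre ++ [""]).length by simp]
        exact List.drop_left
      rw [pvCutLens, dif_pos h, hidx]
      show ((pre.length : Int) :: pvCutLens (PySem.List.slice (pre ++ "" :: suf) (some ((pre.length : Int) + 1)) none)) = _
      rw [hslice, pvSegLens_sep pre suf hp, ih suf.length (by subst hn; simp; omega) suf rfl]
    · rw [pvCutLens, dif_neg h, pvSegLens_no ws h]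

-- ===== dictionary side =====

theorem pvSeed_items :
    ((PySem.List.pyRange 0 489 1).foldl (fun (d : PySem.Dict Int Int) i => d.insert i 0)
      PySem.Dict.empty).items
    = (PySem.List.pyRange 0 489 1).map (fun i => (i, (0 : Int))) := by
  have := PySem.Dict.items_foldl_insert_fresh (l := PySem.List.pyRange 0 489 1)
      (k := fun i => i) (v := fun _ => (0 : Int))
      (d := (PySem.Dict.empty : PySem.Dict Int Int))
      (by intro a _; simp) (by simpa using PySem.List.nodup_pyRange_one 0 489)
  simpa using this

theorem pvB_items (lens : List Int) :
    ((PySem.List.pyRange 0 489 1).foldl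
      (fun (d : PySem.Dict Int Int) i => d.insert i ((PySem.List.count lens i : Nat) : Int))
      PySem.Dict.empty).items
    = (PySem.List.pyRange 0 489 1).map (fun i => (i, ((PySem.List.count lens i : Nat) : Int))) := by
  have := PySem.Dict.items_foldl_insert_fresh (l := PySem.List.pyRange 0 489 1)
      (k := fun i => i) (v := fun i => ((PySem.List.count lens i : Nat) : Int))
      (d := (PySem.Dict.empty : PySem.Dict Int Int))
      (by intro a _; simp) (by simpa using PySem.List.nodup_pyRange_one 0 489)
  simpa using this

theorem pvFoldAdd_self (s : List Int) : ∀ l : List Int, (∀ x ∈ l, x ∈ s) →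
    l.foldl PySem.Set.add s = s := by
  intro l
  induction l with
  | nil => intro _; rfl
  | cons y l ihl =>
    intro hsub
    rw [List.foldl_cons, PySem.Set.add_of_mem (hsub y (by simp))]
    exact ihl (fun x hx => hsub x (by simp [hx]))

theorem pvTally_items (lens : List Int)
    (hb : ∀ L ∈ lens, 0 ≤ L ∧ L < 489) :
    ((lens.foldl (fun (d : PySem.Dict Int Int) L => d.modify L 0 (· + 1))
      ((PySem.List.pyRange 0 489 1).foldl (fun (d : PySem.Dict Int Int) i => d.insert i 0)
        PySem.Dict.empty)).items)
    = (PySem.List.pyRange 0 489 1).map (fun i => (i, (lens.count i : Int))) := by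
  have hseed := pvSeed_items
  set seed := (PySem.List.pyRange 0 489 1).foldl
      (fun (d : PySem.Dict Int Int) i => d.insert i 0) PySem.Dict.empty with hseeddef
  have hkeys : seed.keys = PySem.List.pyRange 0 489 1 := by
    show seed.items.map (·.1) = _
    rw [hseed]; simp [Function.comp_def]
  have hnd : seed.keys.Nodup := by rw [hkeys]; exact PySem.List.nodup_pyRange_one 0 489
  have hkf : (lens.foldl (fun (d : PySem.Dict Int Int) L => d.modify L 0 (· + 1)) seed).keys
      = seed.keys := by
    rw [PySem.Dict.keys_foldl_modify lens 0 (fun _ _ v => v + 1) seed]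
    rw [PySem.Set.update_eq_foldl]
    refine pvFoldAdd_self seed.keys lens ?_
    intro x hx
    rw [hkeys, PySem.List.mem_pyRange_one]
    exact ⟨(hb x hx).1, (hb x hx).2⟩
  have hndf : (lens.foldl (fun (d : PySem.Dict Int Int) L => d.modify L 0 (· + 1)) seed).keys.Nodup := by
    rw [hkf]; exact hnd
  rw [PySem.Dict.items_eq_map_keys _ hndf 0, hkf, hkeys]
  refine List.map_congr_left ?_
  intro i hi
  have hgd : seed.getD i 0 = 0 := by
    refine PySem.Dict.getD_of_mem_items seed ?_ hnd 0
    rw [hseed]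
    exact List.mem_map.2 ⟨i, hi, rfl⟩
  rw [PySem.Dict.getD_foldl_modify_add_one, hgd]
  simp

-- ===== VERDICT (by name: the statement is the Claim_ definition above) =====
theorem calculate_maxlen_spec : Claim_equal_calculate_maxlen := by
  intro cv _ hpre
  unfold Spec_calculate_maxlen calculate_maxlen calculate_maxlen_alt
  simp only []
  rw [pvA_fold]
  have hlens : pvLens cv 0 0 = pvSegLens cv := by
    rw [pvLens_eq_off]; simpa using pvLens0_eq_seg cv
  have hb : ∀ L ∈ pvSegLens cv, 0 ≤ L ∧ L < 489 := by
    intro L hL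
    obtain ⟨l, hl, rfl⟩ := List.mem_map.1 hL
    exact ⟨Int.natCast_nonneg _, by exact_mod_cast hpre l hl⟩
  rw [hlens, pvTally_items _ hb, pvCutLens_eq_seg, pvB_items]
  rfl
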